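-- pv_equiv track=rewrite | github.com/gandhiashutosh14/layoutv2_ocr_key_value | use_layout_lm_model/app_1.py | remove_duplicate_sublists
-- ===== SOURCE A (Python) =====
-- def remove_duplicate_sublists(list_of_sublists):
--     unique_sublists = []
--     seen_sublists = set()
--
--     for sublist in list_of_sublists:
--         tuple_sublist = tuple(sublist)
--
--         if tuple_sublist not in seen_sublists:
--             unique_sublists.append(sublist)
--             seen_sublists.add(tuple_sublist)
--
--     return unique_sublists
-- ===== SOURCE B (Python) =====
-- def remove_duplicate_sublists(list_of_sublists):
--     if not list_of_sublists:
--         return []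
--     head = list_of_sublists[0]
--     rest = [s for s in list_of_sublists[1:] if s != head]
--     return [head] + remove_duplicate_sublists(rest)
-- ===== Notes on version B (the rewrite author's own statement) =====
-- stated objective: alternative
-- what changed: Replaces the single pass with a seen-set accumulator by head recursion: keep the head, filter every later duplicate of it out of the tail, and recurse on the shrunken tail; no auxiliary set, accumulator or index bookkeeping.
import Mathlib
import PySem

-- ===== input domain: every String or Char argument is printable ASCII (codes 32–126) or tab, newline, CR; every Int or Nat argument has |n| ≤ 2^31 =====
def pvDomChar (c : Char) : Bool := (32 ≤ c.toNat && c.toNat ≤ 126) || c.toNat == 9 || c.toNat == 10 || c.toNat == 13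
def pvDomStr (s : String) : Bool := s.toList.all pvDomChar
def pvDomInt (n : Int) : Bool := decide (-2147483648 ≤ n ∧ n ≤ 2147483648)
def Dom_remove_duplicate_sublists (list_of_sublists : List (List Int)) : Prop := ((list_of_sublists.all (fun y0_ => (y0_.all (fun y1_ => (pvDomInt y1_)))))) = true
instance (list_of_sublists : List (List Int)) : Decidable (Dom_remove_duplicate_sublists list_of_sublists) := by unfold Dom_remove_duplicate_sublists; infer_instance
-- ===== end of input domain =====

-- B replaces A's seen-set accumulator pass by head recursion that filters later
-- duplicates of the head out of the tail (objective: alternative; not faster).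


-- ===== PORT A =====
-- for-loop over the input with accumulator (unique_sublists, seen_sublists);
-- Python's tuple(sublist) key is modelled by the sublist itself (same equality on int lists).
def remove_duplicate_sublists (list_of_sublists : List (List Int)) : List (List Int) :=
  (list_of_sublists.foldl
    (fun (st : List (List Int) × PySem.Set (List Int)) sublist =>
      if PySem.Set.contains st.2 sublist then st
      else (st.1 ++ [sublist], PySem.Set.add st.2 sublist))
    (([] : List (List Int)), (PySem.Set.empty : PySem.Set (List Int)))).1

-- ===== PORT B =====
-- head recursion: keep the head, drop its later duplicates from the tail, recurse.
def remove_duplicate_sublists_alt : List (List Int) → List (List Int)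
  | [] => []
  | head :: rest => head :: remove_duplicate_sublists_alt (rest.filter (fun s => s ≠ head))
termination_by xs => xs.length
decreasing_by
  simpa using Nat.lt_succ_of_le (Nat.le_trans (List.length_filter_le _ _) (by simp))

-- ===== PRECONDITION & SPEC =====
def Spec_remove_duplicate_sublists (list_of_sublists : List (List Int)) (out : List (List Int)) : Prop := out = remove_duplicate_sublists_alt list_of_sublists
instance (list_of_sublists : List (List Int)) (out : List (List Int)) : Decidable (Spec_remove_duplicate_sublists list_of_sublists out) := by unfold Spec_remove_duplicate_sublists; infer_instance

-- ===== CLAIM =====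
def Claim_equal_remove_duplicate_sublists : Prop := ∀ (list_of_sublists : List (List Int)), Dom_remove_duplicate_sublists list_of_sublists → Spec_remove_duplicate_sublists list_of_sublists (remove_duplicate_sublists list_of_sublists)

-- ===== LEMMAS AND PROOFS =====

-- reference spec: dedup of xs relative to already-seen prefix `s`
def ddAux (s : List (List Int)) : List (List Int) → List (List Int)
  | [] => []
  | x :: xs => if x ∈ s then ddAux s xs else x :: ddAux (s ++ [x]) xs

lemma A_foldl (xs : List (List Int)) : ∀ (u s : List (List Int)),
    (xs.foldl
      (fun (st : List (List Int) × PySem.Set (List Int)) sublist =>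
        if PySem.Set.contains st.2 sublist then st
        else (st.1 ++ [sublist], PySem.Set.add st.2 sublist))
      (u, s)).1 = u ++ ddAux s xs := by
  induction xs with
  | nil => intro u s; simp [ddAux]
  | cons x xs ih =>
    intro u s
    rw [List.foldl_cons]
    by_cases hx : x ∈ s
    · have hc : PySem.Set.contains s x = true := (PySem.Set.contains_iff s x).mpr hx
      rw [hc, if_pos rfl, ih]
      simp [ddAux, hx]
    · have hc : PySem.Set.contains s x = false :=
        Bool.eq_false_iff.mpr (fun h => hx ((PySem.Set.contains_iff s x).mp h))
      rw [hc, if_neg (by simp), PySem.Set.add_of_not_mem hx, ih]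
      simp [ddAux, hx]

lemma ddAux_eq_alt_filter (xs : List (List Int)) : ∀ (s : List (List Int)),
    ddAux s xs = remove_duplicate_sublists_alt (xs.filter (fun y => y ∉ s)) := by
  induction xs with
  | nil => intro s; simp [ddAux, remove_duplicate_sublists_alt]
  | cons x xs ih =>
    intro s
    by_cases hx : x ∈ s
    · rw [ddAux, if_pos hx, List.filter_cons_of_neg (by simpa using hx), ih]
    · rw [ddAux, if_neg hx, List.filter_cons_of_pos (by simpa using hx),
        remove_duplicate_sublists_alt, List.filter_filter, ih (s ++ [x])]
      have hf : List.filter (fun y => decide (y ∉ s ++ [x])) xs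
          = List.filter (fun a => decide (a ≠ x) && decide (a ∉ s)) xs := by
        apply List.filter_congr
        intro y _
        by_cases h1 : y ∈ s <;> by_cases h2 : y = x <;> simp [h1, h2]
      rw [hf]

-- ===== VERDICT =====
theorem remove_duplicate_sublists_spec : Claim_equal_remove_duplicate_sublists := by
  intro xs _
  show remove_duplicate_sublists xs = remove_duplicate_sublists_alt xs
  unfold remove_duplicate_sublists
  rw [A_foldl, show (PySem.Set.empty : PySem.Set (List Int)) = ([] : List (List Int)) from rfl,
    List.nil_append, ddAux_eq_alt_filter]
  congr 1
  simp
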